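-- pv_equiv track=rewrite | github.com/romcheese/vhp | prac25.py | TransformTransform
-- ===== SOURCE A (Python) =====
-- def TransformTransform(A, N):
--     def Transform(A):
--         N = len(A)
--         B = []
--         for i in range(N):
--             for j in range(N-i):
--                 k = i+j
--                 try:
--                     B.append(max(A[j:k+1]))
--                 except ValueError:
--                     pass
--         return B
--
--     x = Transform(A)
--     y = sum(Transform(x))
--
--     if y%2 == 0:
--         return True
--     else:
--         return False
-- ===== SOURCE B (Python) =====
-- def TransformTransform(A, N):
--     def transform(a):
--         # maxima of all contiguous windows, listed by increasing length then start,
--         # built incrementally: row for length L from the row for length L-1 (O(n^2))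
--         n = len(a)
--         prev = list(a)
--         out = list(a)
--         for L in range(2, n + 1):
--             prev = [max(prev[j], a[j + L - 1]) for j in range(n - L + 1)]
--             out.extend(prev)
--         return out
--
--     x = transform(A)
--     return sum(transform(x)) % 2 == 0
-- ===== Notes on version B (the rewrite author's own statement) =====
-- stated objective: faster
-- what changed: Replaces recomputing max(slice) from scratch for every window (inside Transform) with a dynamic program that derives the row of window maxima for length L from the row for length L-1, so each of the O(M^2) windows of the second pass costs O(1) instead of O(M).
import Mathlib
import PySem

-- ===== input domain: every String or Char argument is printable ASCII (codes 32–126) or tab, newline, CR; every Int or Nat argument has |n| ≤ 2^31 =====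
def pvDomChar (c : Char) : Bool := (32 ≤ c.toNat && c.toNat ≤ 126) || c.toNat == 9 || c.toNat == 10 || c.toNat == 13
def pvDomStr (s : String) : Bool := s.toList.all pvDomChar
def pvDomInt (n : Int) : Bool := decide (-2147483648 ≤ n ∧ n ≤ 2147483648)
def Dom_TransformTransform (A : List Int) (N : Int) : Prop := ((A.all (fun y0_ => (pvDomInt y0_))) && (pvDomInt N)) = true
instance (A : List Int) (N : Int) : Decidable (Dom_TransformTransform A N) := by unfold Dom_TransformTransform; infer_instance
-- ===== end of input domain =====

-- B replaces A's recompute-the-slice-max for every window (and its O(N^6) total) by a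
-- dynamic program that derives each window-length row of maxima from the previous row;
-- objective: faster (asymptotic, O(N^4) vs O(N^6)).  The parameter N is unused by A (it is
-- shadowed inside the helper) and by B alike.

-- ===== PORT A =====
-- inner helper Transform of A: for i in range(N): for j in range(N-i): append max(A[j:i+j+1])
-- (the except ValueError path would skip an empty slice; the slice is never empty, and the
-- port's `none` branch transliterates the `pass`)
def TransformA (a : List Int) : List Int :=
  let n : Int := a.length
  (PySem.List.pyRange 0 n 1).foldl (fun B i =>
    (PySem.List.pyRange 0 (n - i) 1).foldl (fun B j =>
      let k := i + j
      match PySem.List.max? (PySem.List.slice a (some j) (some (k + 1))) (fun y => y) with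
      | some m => B ++ [m]
      | none => B) B) []

def TransformTransform (A : List Int) (N : Int) : Bool :=
  let x := TransformA A
  let y := (TransformA x).foldl (· + ·) 0
  if PySem.Int.mod y 2 == 0 then true else false

-- ===== PORT B =====
-- B's helper: row of window maxima for length L from the row for length L-1
def TransformB (a : List Int) : List Int :=
  let n : Int := a.length
  let st := (PySem.List.pyRange 2 (n + 1) 1).foldl
    (fun (st : List Int × List Int) L =>
      let prev := (PySem.List.pyRange 0 (n - L + 1) 1).map (fun j =>
          max (PySem.List.pyGetD st.1 j 0) (PySem.List.pyGetD a (j + L - 1) 0))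
      (prev, st.2 ++ prev)) (a, a)
  st.2

def TransformTransform_alt (A : List Int) (N : Int) : Bool :=
  let x := TransformB A
  decide (PySem.Int.mod ((TransformB x).foldl (· + ·) 0) 2 = 0)

-- ===== PRECONDITION & SPEC =====
def Spec_TransformTransform (A : List Int) (N : Int) (out : Bool) : Prop := out = TransformTransform_alt A N
instance (A : List Int) (N : Int) (out : Bool) : Decidable (Spec_TransformTransform A N out) := by unfold Spec_TransformTransform; infer_instance

-- ===== CLAIM (what is proved, stated in full; the proofs are below) =====
def Claim_equal_TransformTransform : Prop := ∀ (A : List Int) (N : Int), Dom_TransformTransform A N → Spec_TransformTransform A N (TransformTransform A N)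

-- ===== LEMMAS AND PROOFS =====

-- max of the window a[j..j+L] (L+1 elements), the common specification of both ports
def wmax (a : List Int) (j : Nat) : Nat → Int
  | 0 => a.getD j 0
  | L + 1 => max (wmax a j L) (a.getD (j + L + 1) 0)

-- the row of maxima of all windows of length i+1, in start order
def rowN (a : List Int) (i : Nat) : List Int :=
  (List.range (a.length - i)).map (fun j => wmax a j i)

-- concatenation of the rows for lengths 1..M
def catN (a : List Int) (M : Nat) : List Int :=
  (List.range M).foldl (fun acc i => acc ++ rowN a i) []

lemma max?_append_singleton (xs : List Int) (y m : Int)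
    (h : PySem.List.max? xs (fun v => v) = some m) :
    PySem.List.max? (xs ++ [y]) (fun v => v) = some (max m y) := by
  cases xs with
  | nil => simp [PySem.List.max?] at h
  | cons x t =>
    rw [PySem.List.max?_id_cons] at h
    rw [List.cons_append, PySem.List.max?_id_cons, List.foldl_append]
    simp_all

lemma max?_window (a : List Int) (j L : Nat) (h : j + L < a.length) :
    PySem.List.max? ((a.drop j).take (L + 1)) (fun y => y) = some (wmax a j L) := by
  induction L with
  | zero =>
    have hj : j < a.length := by omega
    have hd : List.take 1 (List.drop j a) = [a[j]] := by
      rw [List.drop_eq_getElem_cons hj, List.take_succ_cons, List.take_zero]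
    rw [hd, PySem.List.max?_id_cons]
    simp [wmax, List.getElem?_eq_getElem hj]
  | succ L ih =>
    have h1 : j + L < a.length := by omega
    have h2 : (a.drop j)[L + 1]? = some a[j + L + 1] := by
      rw [List.getElem?_drop]
      exact List.getElem?_eq_getElem (by omega)
    rw [List.take_add_one, h2]
    have := max?_append_singleton _ a[j + L + 1] _ (ih h1)
    simpa [wmax, List.getElem?_eq_getElem (by omega : j + L + 1 < a.length)] using this

lemma row_zero (a : List Int) : rowN a 0 = a := by
  apply List.ext_getElem
  · simp [rowN]
  · intro i h1 h2
    simp only [rowN, Nat.sub_zero] at *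
    rw [List.getElem_map, List.getElem_range]
    simp [wmax, List.getElem?_eq_getElem h2]

lemma catN_succ (a : List Int) (M : Nat) : catN a (M + 1) = catN a M ++ rowN a M := by
  simp [catN, List.range_succ]

lemma A_rows (a : List Int) : TransformA a = catN a a.length := by
  simp only [TransformA, PySem.List.pyRange_zero_nat, List.foldl_map]
  unfold catN
  apply PySem.List.foldl_congr_mem
  intro B i hi
  rw [List.mem_range] at hi
  have hsub : (a.length : Int) - (i : Int) = ((a.length - i : Nat) : Int) := by
    omega
  rw [hsub, PySem.List.pyRange_zero_nat, List.foldl_map]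
  have hcong : ∀ (B' : List Int), ∀ j ∈ List.range (a.length - i),
      (fun (B : List Int) (j : Nat) =>
        match PySem.List.max? (PySem.List.slice a (some (j : Int)) (some ((i : Int) + (j : Int) + 1))) (fun y => y) with
        | some m => B ++ [m]
        | none => B) B' j = B' ++ [wmax a j i] := by
    intro B' j hj
    rw [List.mem_range] at hj
    have hcast : (i : Int) + (j : Int) + 1 = ((i + j + 1 : Nat) : Int) := by push_cast; ring
    have : PySem.List.max? (PySem.List.slice a (some (j : Int)) (some ((i : Int) + (j : Int) + 1))) (fun y => y)
        = some (wmax a j i) := by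
      rw [hcast, PySem.List.slice_natCast]
      have : i + j + 1 - j = i + 1 := by omega
      rw [this]
      exact max?_window a j i (by omega)
    simp [this]
  rw [PySem.List.foldl_congr_mem _ _ _ _ hcong, PySem.List.foldl_append_singleton_eq_map]
  rfl

lemma B_loop (a : List Int) (M : Nat) (h1 : 1 ≤ M) (h2 : M ≤ a.length) :
    (PySem.List.pyRange 2 ((M : Int) + 1) 1).foldl
      (fun (st : List Int × List Int) L =>
        let prev := (PySem.List.pyRange 0 ((a.length : Int) - L + 1) 1).map (fun j =>
            max (PySem.List.pyGetD st.1 j 0) (PySem.List.pyGetD a (j + L - 1) 0))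
        (prev, st.2 ++ prev)) (a, a)
    = (rowN a (M - 1), catN a M) := by
  induction M with
  | zero => omega
  | succ M ih =>
    cases Nat.eq_or_lt_of_le h1 with
    | inl h =>
      have : M = 0 := by omega
      subst this
      rw [show ((1 : Nat) : Int) + 1 = 2 by norm_num, PySem.List.pyRange_one_eq_nil (by norm_num)]
      simp [catN, row_zero]
    | inr h =>
      have hM1 : 1 ≤ M := by omega
      have hMn : M ≤ a.length := by omega
      have hsucc : ((M + 1 : Nat) : Int) + 1 = ((M : Int) + 1) + 1 := by push_cast; ring
      rw [hsucc, PySem.List.pyRange_one_succ_right (by omega), List.foldl_append,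
        ih hM1 hMn]
      simp only [List.foldl_cons, List.foldl_nil]
      have hlen : (a.length : Int) - ((M : Int) + 1) + 1 = ((a.length - M : Nat) : Int) := by
        omega
      have hrow : (PySem.List.pyRange 0 ((a.length : Int) - ((M : Int) + 1) + 1) 1).map
          (fun j => max (PySem.List.pyGetD (rowN a (M - 1)) j 0)
                        (PySem.List.pyGetD a (j + ((M : Int) + 1) - 1) 0))
          = rowN a M := by
        rw [hlen, PySem.List.pyRange_zero_nat, List.map_map]
        have hR : rowN a M = (List.range (a.length - M)).map (fun j => wmax a j M) := rfl
        rw [hR]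
        apply List.map_congr_left
        intro j hj
        rw [List.mem_range] at hj
        simp only [Function.comp]
        have e1 : PySem.List.pyGetD (rowN a (M - 1)) ((j : Nat) : Int) 0 = wmax a j (M - 1) := by
          rw [PySem.List.pyGetD_natCast]
          unfold rowN
          exact PySem.List.getD_map_range _ _ _ _ (by omega)
        have e2 : ((j : Nat) : Int) + ((M : Int) + 1) - 1 = ((j + M : Nat) : Int) := by
          push_cast; ring
        rw [e1, e2, PySem.List.pyGetD_natCast]

        have : M = (M - 1) + 1 := by omega
        rw [this]
        show max (wmax a j (M - 1)) (a.getD (j + ((M - 1) + 1)) 0) = wmax a j ((M - 1) + 1)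
        simp [wmax, Nat.add_assoc]
      rw [hrow, catN_succ]
      simp
lemma B_rows (a : List Int) : TransformB a = catN a a.length := by
  cases a with
  | nil =>
    simp only [TransformB]
    rw [show ((List.length ([] : List Int) : Int) + 1) = 1 by simp,
      PySem.List.pyRange_one_eq_nil (by norm_num)]
    rfl
  | cons x t =>
    simp only [TransformB]
    have h1 : 1 ≤ (x :: t).length := by simp
    have := B_loop (x :: t) (x :: t).length h1 (le_refl _)
    rw [this]

lemma AB_eq (a : List Int) : TransformA a = TransformB a := by
  rw [A_rows, B_rows]

-- ===== VERDICT (by name: the statement is the Claim_ definition above) =====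
theorem TransformTransform_spec : Claim_equal_TransformTransform := by
  intro A N _
  unfold Spec_TransformTransform TransformTransform TransformTransform_alt
  rw [AB_eq]
  cases h : PySem.Int.mod ((TransformA (TransformB A)).foldl (· + ·) 0) 2 == 0 <;>
    simp_all [AB_eq]
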